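-- pv_equiv track=rewrite | github.com/kktsubota/compe | problems/atcoder/beginner_contest/179_20200919/b.py | find
-- ===== SOURCE A (Python) =====
-- def find(d):
--     pp = False
--     p = False
--     for d1, d2 in d:
--         now = (d1 == d2)
--         if pp and p and now:
--             return True
--         pp = p
--         p = now
--
--     return False
-- ===== SOURCE B (Python) =====
-- def find(d):
--     # Run-length encode the boolean "doubled roll" sequence, then test the
--     # longest run: True iff some run of equal-pair rolls has length >= 3.
--     runs = []
--     n = 0
--     for d1, d2 in d:
--         if d1 == d2:
--             n += 1
--         else:
--             runs.append(n)
--             n = 0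
--     runs.append(n)
--     return max(runs) >= 3
-- ===== Notes on version B (the rewrite author's own statement) =====
-- stated objective: alternative
-- what changed: Replaces A's streaming shift-register scan (pp/p with early return) with a run-length encoding of the doubled-roll sequence followed by a max-run-length >= 3 test.
import Mathlib
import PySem

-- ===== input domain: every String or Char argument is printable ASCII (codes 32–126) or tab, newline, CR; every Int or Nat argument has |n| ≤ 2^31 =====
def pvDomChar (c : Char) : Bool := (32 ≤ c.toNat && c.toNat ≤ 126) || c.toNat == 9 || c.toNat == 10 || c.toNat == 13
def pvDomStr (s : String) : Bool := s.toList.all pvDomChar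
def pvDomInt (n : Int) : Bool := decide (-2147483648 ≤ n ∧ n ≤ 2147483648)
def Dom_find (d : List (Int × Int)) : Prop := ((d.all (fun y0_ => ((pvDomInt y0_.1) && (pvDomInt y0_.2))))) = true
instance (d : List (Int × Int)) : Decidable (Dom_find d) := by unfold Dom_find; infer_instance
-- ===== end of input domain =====

-- B replaces A's streaming shift-register scan with a run-length encoding of the
-- doubled-roll sequence followed by a max-run-length >= 3 test (alternative, same O(n)).


-- ===== PORT A =====
-- the for-loop with shift-register state (pp, p) and an early `return True`
def findLoop (pp p : Bool) : List (Int × Int) → Bool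
  | [] => false
  | (d1, d2) :: rest =>
    let now : Bool := d1 == d2
    if pp && p && now then true else findLoop p now rest

def find (d : List (Int × Int)) : Bool := findLoop false false d

-- ===== PORT B =====
-- the run-length-encoding loop: `runs` is built in order, the trailing counter
-- `n` is appended when a run ends and once more after the loop
def runsAux : List (Int × Int) → Nat → List Nat
  | [], n => [n]
  | (d1, d2) :: rest, n =>
    if d1 == d2 then runsAux rest (n + 1) else n :: runsAux rest 0

-- `max(runs)` on the (always nonempty) list of run lengths, as a max-fold
def find_alt (d : List (Int × Int)) : Bool :=
  let runs := runsAux d 0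
  decide (3 ≤ runs.foldl Nat.max 0)

-- ===== PRECONDITION & SPEC =====
def Spec_find (d : List (Int × Int)) (out : Bool) : Prop := out = find_alt d
instance (d : List (Int × Int)) (out : Bool) : Decidable (Spec_find d out) := by unfold Spec_find; infer_instance

-- ===== CLAIM (what is proved, stated in full; the proofs are below) =====
def Claim_equal_find : Prop := ∀ (d : List (Int × Int)), Dom_find d → Spec_find d (find d)

-- ===== LEMMAS AND PROOFS =====

theorem foldl_max_shift (t : List Nat) : ∀ a : Nat,
    t.foldl Nat.max a = Nat.max a (t.foldl Nat.max 0) := by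
  induction t with
  | nil => intro a; simp [List.foldl]
  | cons b t ih =>
    intro a
    simp only [List.foldl]
    rw [ih (Nat.max a b), ih (Nat.max 0 b)]
    simp [Nat.max_assoc]

theorem le_max_runsAux (l : List (Int × Int)) : ∀ c : Nat,
    c ≤ (runsAux l c).foldl Nat.max 0 := by
  induction l with
  | nil => intro c; simp [runsAux]
  | cons hd tl ih =>
    intro c
    obtain ⟨d1, d2⟩ := hd
    by_cases h : (d1 == d2) = true
    · have := ih (c + 1)
      simp [runsAux, h]
      omega
    · rw [show runsAux ((d1, d2) :: tl) c = c :: runsAux tl 0 from by simp [runsAux, h]]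
      simp only [List.foldl]
      rw [foldl_max_shift]
      simp

theorem findLoop_drop_pp (l : List (Int × Int)) (a : Bool) :
    findLoop a false l = findLoop false false l := by
  cases l with
  | nil => rfl
  | cons hd tl => obtain ⟨d1, d2⟩ := hd; simp [findLoop]

theorem findLoop_eq_runs (l : List (Int × Int)) : ∀ c : Nat, c ≤ 2 →
    findLoop (decide (2 ≤ c)) (decide (1 ≤ c)) l
      = decide (3 ≤ (runsAux l c).foldl Nat.max 0) := by
  induction l with
  | nil =>
    intro c hc
    simp [findLoop, runsAux]
    omega
  | cons hd tl ih =>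
    intro c hc
    obtain ⟨d1, d2⟩ := hd
    by_cases h : (d1 == d2) = true
    · by_cases hc2 : c = 2
      · subst hc2
        have h3 := le_max_runsAux tl 3
        simp [findLoop, runsAux, h]
        omega
      · have hle : c + 1 ≤ 2 := by omega
        have e1 : decide (1 ≤ c) = decide (2 ≤ c + 1) := decide_eq_decide.mpr (by omega)
        have e2 : (true : Bool) = decide (1 ≤ c + 1) := by simp
        have hc2' : decide (2 ≤ c) = false := by simp; omega
        simp only [findLoop, h, hc2', Bool.false_and, if_neg (by simp : ¬(false = true))]
        rw [e1, e2, ih (c + 1) hle]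
        simp [runsAux, h]
    · have hstep : findLoop (decide (2 ≤ c)) (decide (1 ≤ c)) ((d1, d2) :: tl)
          = findLoop (decide (1 ≤ c)) false tl := by
        simp [findLoop, h]
      rw [hstep, findLoop_drop_pp]
      have h0 : findLoop false false tl = decide (3 ≤ (runsAux tl 0).foldl Nat.max 0) := by
        have := ih 0 (by omega)
        simpa using this
      rw [h0]
      have : (runsAux ((d1, d2) :: tl) c).foldl Nat.max 0
          = Nat.max c ((runsAux tl 0).foldl Nat.max 0) := by
        rw [show runsAux ((d1, d2) :: tl) c = c :: runsAux tl 0 from by simp [runsAux, h]]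
        simp only [List.foldl]
        rw [foldl_max_shift]
        simp
      rw [this]
      exact decide_eq_decide.mpr (by
        have hmax : Nat.max c ((runsAux tl 0).foldl Nat.max 0)
            = if c ≤ (runsAux tl 0).foldl Nat.max 0 then (runsAux tl 0).foldl Nat.max 0 else c :=
          Nat.max_def
        rw [hmax]
        split <;> omega)

-- ===== VERDICT (by name: the statement is the Claim_ definition above) =====
theorem find_spec : Claim_equal_find := by
  intro d _
  unfold Spec_find find find_alt
  have := findLoop_eq_runs d 0 (by omega)
  simpa using this
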